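-- pv_equiv track=rewrite | github.com/ArduPilot/MAVProxy | MAVProxy/modules/mavproxy_mode.py | build_pt_ignoremask
-- ===== SOURCE A (Python) =====
-- def build_pt_ignoremask(bits, force_not_accel=False):
--     '''creates an ignore bitmask which ignores all bits except the ones passed in'''
--     ignore_bits = {
--         "X": 1,  # POSITION_TARGET_TYPEMASK_X_IGNORE
--         "Y": 2,
--         "Z": 4,
--         "VX": 8,
--         "VY": 16,
--         "VZ": 32,
--         "AX": 64,
--         "AY": 128,
--         "AZ": 256,
--         "YAW": 1024,
--         "YAWRATE": 2048,
--     }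
--     value = 0
--     for (n, v) in ignore_bits.items():
--         if n not in bits:
--             value |= v
--
--     # as of ArduCopter 4.6.0-dev, you can't ignore any axis if you
--     # want the others to be honoured.
--     for prefix in "", "V", "A":
--         for axis in "X", "Y", "Z":
--             name = f"{prefix}{axis}"
--             if (value & ignore_bits[name]) == 0:
--                 # not ignoring this axis, so unmark the other axes as ignored
--                 for resetaxis in "X", "Y", "Z":
--                     resetname = f"{prefix}{resetaxis}"
--                     value = value & ~ignore_bits[resetname]
--                 break
--
--     if force_not_accel:
--         value |= 512  # POSITION_TARGET_TYPEMASK_FORCE_SET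
--
--     return value
-- ===== SOURCE B (Python) =====
-- def build_pt_ignoremask(bits, force_not_accel=False):
--     '''creates an ignore bitmask which ignores all bits except the ones passed in'''
--     # A whole XYZ group stays ignored only if none of its axes was requested;
--     # otherwise (per ArduCopter rule) all three of its ignore bits end up clear.
--     value = 0
--     for prefix, shift in (("", 0), ("V", 3), ("A", 6)):
--         if not any(prefix + axis in bits for axis in ("X", "Y", "Z")):
--             value |= 7 << shift
--     if "YAW" not in bits:
--         value |= 1024
--     if "YAWRATE" not in bits:
--         value |= 2048
--     if force_not_accel:
--         value |= 512
--     return value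
-- ===== Notes on version B (the rewrite author's own statement) =====
-- stated objective: simpler
-- what changed: A first ORs in every absent axis bit and then runs a triple-nested scan-with-break that clears a whole XYZ group's bits whenever its first non-ignored axis is found; B never builds and then erases state: for each of the three groups it tests directly whether any of the group's axis names was requested and ORs in the whole 7-bit group mask only if none was, adding the YAW/YAWRATE bits by two plain membership tests.
import Mathlib
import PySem

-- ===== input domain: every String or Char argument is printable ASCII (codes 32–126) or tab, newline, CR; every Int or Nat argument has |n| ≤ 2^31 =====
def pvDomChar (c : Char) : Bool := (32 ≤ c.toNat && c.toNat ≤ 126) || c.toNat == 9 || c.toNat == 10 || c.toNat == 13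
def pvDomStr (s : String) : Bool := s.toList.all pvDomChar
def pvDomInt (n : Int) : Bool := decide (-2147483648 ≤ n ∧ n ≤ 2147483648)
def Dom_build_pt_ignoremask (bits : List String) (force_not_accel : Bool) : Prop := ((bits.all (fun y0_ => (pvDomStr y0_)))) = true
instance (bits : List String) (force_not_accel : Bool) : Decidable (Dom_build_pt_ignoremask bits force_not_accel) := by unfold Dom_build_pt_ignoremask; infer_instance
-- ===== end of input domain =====

-- B replaces A's triple-nested scan-with-break (clear a whole XYZ group when some axis is requested) by computing each group's ignore bits directly from membership of its three axis names; objective: simpler.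
-- ===== PORT A =====
-- The dict literal of A, as an association list in insertion order (all keys distinct).
def ptIgnoreBits : List (String × Int) :=
  [("X", 1), ("Y", 2), ("Z", 4), ("VX", 8), ("VY", 16), ("VZ", 32),
   ("AX", 64), ("AY", 128), ("AZ", 256), ("YAW", 1024), ("YAWRATE", 2048)]

-- ignore_bits[name]; every lookup in A uses a key present in the dict, so getD 0 is exact there.
def ibGet (name : String) : Int := (ptIgnoreBits.lookup name).getD 0

-- inner 'for resetaxis in "X","Y","Z": value = value & ~ignore_bits[resetname]'
def ptResetLoop (pfx : String) (value : Int) : Int :=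
  ["X", "Y", "Z"].foldl (fun v ax => PySem.Int.band v (Int.not (ibGet (pfx ++ ax)))) value

-- inner 'for axis in "X","Y","Z": … break' — the break is the return after the reset loop
def ptAxisScan (pfx : String) (value : Int) : List String → Int
  | [] => value
  | ax :: rest =>
      if (PySem.Int.band value (ibGet (pfx ++ ax))) == 0 then ptResetLoop pfx value
      else ptAxisScan pfx value rest

def build_pt_ignoremask (bits : List String) (force_not_accel : Bool) : Int :=
  let value : Int := ptIgnoreBits.foldl
    (fun value nv => if bits.contains nv.1 then value else PySem.Int.bor value nv.2) 0
  let value := ["", "V", "A"].foldl (fun v p => ptAxisScan p v ["X", "Y", "Z"]) value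
  if force_not_accel then PySem.Int.bor value 512 else value

-- ===== PORT B =====
def build_pt_ignoremask_alt (bits : List String) (force_not_accel : Bool) : Int :=
  let value : Int := [("", 0), ("V", 3), ("A", 6)].foldl
    (fun v (ps : String × Nat) =>
      if ["X", "Y", "Z"].any (fun ax => bits.contains (ps.1 ++ ax)) then v
      else PySem.Int.bor v ((7 : Int) <<< ps.2)) 0
  let value := if bits.contains "YAW" then value else PySem.Int.bor value 1024
  let value := if bits.contains "YAWRATE" then value else PySem.Int.bor value 2048
  if force_not_accel then PySem.Int.bor value 512 else value

-- ===== PRECONDITION & SPEC =====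
def Spec_build_pt_ignoremask (bits : List String) (force_not_accel : Bool) (out : Int) : Prop := out = build_pt_ignoremask_alt bits force_not_accel
instance (bits : List String) (force_not_accel : Bool) (out : Int) : Decidable (Spec_build_pt_ignoremask bits force_not_accel out) := by unfold Spec_build_pt_ignoremask; infer_instance

-- ===== CLAIM (what is proved, stated in full; the proofs are below) =====
def Claim_equal_build_pt_ignoremask : Prop := ∀ (bits : List String) (force_not_accel : Bool), Dom_build_pt_ignoremask bits force_not_accel → Spec_build_pt_ignoremask bits force_not_accel (build_pt_ignoremask bits force_not_accel)

-- ===== LEMMAS AND PROOFS =====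
-- Both ports consult `bits` only through `bits.contains` at the eleven axis names, so each is
-- definitionally a boolean core function of those eleven membership flags; the cores are then
-- compared exhaustively. gA mirrors A's code, gB mirrors B's code, with the membership results
-- passed in as booleans.
def gA (bX bY bZ bVX bVY bVZ bAX bAY bAZ bYW bYR f : Bool) : Int :=
  let value : Int := [(bX,(1:Int)),(bY,2),(bZ,4),(bVX,8),(bVY,16),(bVZ,32),(bAX,64),(bAY,128),(bAZ,256),(bYW,1024),(bYR,2048)].foldl
    (fun value nv => if nv.1 then value else PySem.Int.bor value nv.2) 0
  let value := ["", "V", "A"].foldl (fun v p => ptAxisScan p v ["X", "Y", "Z"]) value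
  if f then PySem.Int.bor value 512 else value

def gB (bX bY bZ bVX bVY bVZ bAX bAY bAZ bYW bYR f : Bool) : Int :=
  let value : Int := [((bX,bY,bZ),(0:Nat)),((bVX,bVY,bVZ),3),((bAX,bAY,bAZ),6)].foldl
    (fun v t => if (t.1.1 || (t.1.2.1 || (t.1.2.2 || false))) then v else PySem.Int.bor v ((7 : Int) <<< t.2)) 0
  let value := if bYW then value else PySem.Int.bor value 1024
  let value := if bYR then value else PySem.Int.bor value 2048
  if f then PySem.Int.bor value 512 else value

theorem bridgeA (bits : List String) (f : Bool) :
    build_pt_ignoremask bits f = gA (bits.contains "X") (bits.contains "Y") (bits.contains "Z")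
      (bits.contains "VX") (bits.contains "VY") (bits.contains "VZ")
      (bits.contains "AX") (bits.contains "AY") (bits.contains "AZ")
      (bits.contains "YAW") (bits.contains "YAWRATE") f := rfl

theorem bridgeB (bits : List String) (f : Bool) :
    build_pt_ignoremask_alt bits f = gB (bits.contains "X") (bits.contains "Y") (bits.contains "Z")
      (bits.contains "VX") (bits.contains "VY") (bits.contains "VZ")
      (bits.contains "AX") (bits.contains "AY") (bits.contains "AZ")
      (bits.contains "YAW") (bits.contains "YAWRATE") f := rfl

set_option maxHeartbeats 4000000 in
set_option maxRecDepth 10000 in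
theorem gA_eq_gB : ∀ bX bY bZ bVX bVY bVZ bAX bAY bAZ bYW bYR f : Bool,
    gA bX bY bZ bVX bVY bVZ bAX bAY bAZ bYW bYR f = gB bX bY bZ bVX bVY bVZ bAX bAY bAZ bYW bYR f := by
  decide

-- ===== VERDICT (by name: the statement is the Claim_ definition above) =====
theorem build_pt_ignoremask_spec : Claim_equal_build_pt_ignoremask := by
  intro bits f _
  unfold Spec_build_pt_ignoremask
  rw [bridgeA, bridgeB]
  exact gA_eq_gB _ _ _ _ _ _ _ _ _ _ _ _
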